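-- pv_equiv track=rewrite | github.com/ashshekhar/leetcode-problems-solutions | 1376.time-needed-to-inform-all-employees.py | findAllReportingEmployees
-- ===== SOURCE A (Python) =====
-- def findAllReportingEmployees(manager, managerToEmployeeMappings, result):
--
--     # if the subproblem is already seen before
--     if manager in result:
--         # return the already computed mapping
--         return result.get(manager)
--
--     # find all employees reporting directly to the current manager
--     managerEmployees = managerToEmployeeMappings.get(manager)
--
--     # find all employees reporting indirectly to the current manager
--     for reportee in managerEmployees.copy():
--         # find all employees reporting to the current employee
--         employees = findAllReportingEmployees(reportee, managerToEmployeeMappings,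
--                                                 result)
--
--         # move those employees to the current manager
--         if employees:
--             managerEmployees.update(employees)
--
--     # save the result to avoid recomputation and return it
--     result[manager] = managerEmployees
--     return managerEmployees
-- ===== SOURCE B (Python) =====
-- def findAllReportingEmployees(manager, managerToEmployeeMappings, result):
--     # Iterative post-order traversal with an explicit frame stack instead of
--     # memoized recursion.  Each frame is (node, pending direct reportees, the
--     # set accumulated for that node); when a frame's pending list is empty the
--     # node is finished: its set is cached in `result` and merged into its
--     # parent's accumulator.
--     if manager in result:
--         return result[manager]
--     kids = managerToEmployeeMappings[manager]
--     stack = [(manager, list(kids), kids.copy())]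
--     while stack:
--         node, pending, acc = stack[-1]
--         if pending:
--             child = pending.pop(0)
--             if child in result:
--                 emp = result[child]
--                 if emp:
--                     acc.update(emp)
--             else:
--                 ckids = managerToEmployeeMappings[child]
--                 stack.append((child, list(ckids), ckids.copy()))
--         else:
--             stack.pop()
--             result[node] = acc
--             if stack and acc:
--                 stack[-1][2].update(acc)
--     return result[manager]
-- ===== Notes on version B (the rewrite author's own statement) =====
-- stated objective: alternative
-- what changed: A's memoized recursive DFS (function calls + early-return cache) is replaced by an iterative post-order traversal driven by an explicit stack of (node, pending reportees, accumulated set) frames, merging each finished frame into its parent; same cache dict, same merge order, same return value.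
import Mathlib
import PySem

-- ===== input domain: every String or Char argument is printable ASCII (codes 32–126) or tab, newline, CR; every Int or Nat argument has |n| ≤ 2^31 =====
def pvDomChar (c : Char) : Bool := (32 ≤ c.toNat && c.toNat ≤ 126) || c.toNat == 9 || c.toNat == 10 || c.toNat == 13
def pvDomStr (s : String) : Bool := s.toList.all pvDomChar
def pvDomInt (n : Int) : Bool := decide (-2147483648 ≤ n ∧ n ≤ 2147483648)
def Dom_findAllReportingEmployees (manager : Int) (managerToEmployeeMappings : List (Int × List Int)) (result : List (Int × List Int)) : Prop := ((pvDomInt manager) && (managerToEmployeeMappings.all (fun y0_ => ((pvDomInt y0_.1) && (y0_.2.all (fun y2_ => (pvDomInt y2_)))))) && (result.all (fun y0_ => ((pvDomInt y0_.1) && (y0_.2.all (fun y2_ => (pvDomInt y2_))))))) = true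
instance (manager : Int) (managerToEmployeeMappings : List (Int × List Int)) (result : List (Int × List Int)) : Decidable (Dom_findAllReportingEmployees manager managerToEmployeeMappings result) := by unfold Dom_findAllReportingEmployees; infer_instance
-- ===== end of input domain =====

-- B replaces A's memoized recursive DFS by an iterative post-order traversal with an explicit
-- frame stack (same cache, same merge order).  Equivalence is about the RETURN value: A mutates
-- the mapping's set objects in place and stores them into `result`; B leaves the mapping's sets
-- untouched and stores fresh sets with the same contents into `result`.

-- ===== PORT A =====
-- Python A recurses through the reporting graph; the Lean port carries an explicit fuel
-- (recursion-depth bound).  Fuel `mappings.length + 2` is proved sufficient on Pre_ below;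
-- `none` marks the inputs where the Python raises (missing key → AttributeError, or a cycle
-- → RecursionError), which Pre_ excludes.
mutual
def goA (map : PySem.Dict Int (List Int)) : Nat → Int → PySem.Dict Int (List Int) → Option (List Int × PySem.Dict Int (List Int))
  | 0, _, _ => none
  | f+1, u, res =>
    match PySem.Dict.get? res u with
    | some v => some (v, res)                                  -- if manager in result: return result.get(manager)
    | none =>
      match PySem.Dict.get? map u with
      | none => none                                           -- .get miss → AttributeError on .copy()
      | some me =>
        match goAList map f me me res with                     -- for reportee in managerEmployees.copy(): …
        | none => none
        | some (acc, res') => some (acc, PySem.Dict.insert res' u acc)   -- result[manager] = managerEmployees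
termination_by f => (f, 0)

def goAList (map : PySem.Dict Int (List Int)) : Nat → List Int → List Int → PySem.Dict Int (List Int) → Option (List Int × PySem.Dict Int (List Int))
  | _, [], acc, res => some (acc, res)
  | f, c :: cs, acc, res =>
    match goA map f c res with
    | none => none
    | some (emp, res') =>
      goAList map f cs (if emp = [] then acc else PySem.Set.update acc emp) res'   -- if employees: managerEmployees.update(employees)
termination_by f cs => (f, cs.length + 1)
end

def findAllReportingEmployees (manager : Int) (managerToEmployeeMappings : List (Int × List Int)) (result : List (Int × List Int)) : List Int :=
  match goA (PySem.Dict.mk managerToEmployeeMappings) (managerToEmployeeMappings.length + 2) manager (PySem.Dict.mk result) with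
  | some (v, _) => v
  | none => []

-- ===== PORT B =====
-- B's while loop over the explicit frame stack; a frame is (node, pending reportees, accumulated set).
-- Fuel bounds the number of loop iterations (proved sufficient on Pre_); none = Python raises there.
def loopB (map : PySem.Dict Int (List Int)) : Nat → List (Int × List Int × List Int) → PySem.Dict Int (List Int) → Option (PySem.Dict Int (List Int))
  | _, [], res => some res                                      -- while stack: … falls through
  | 0, _ :: _, _ => none
  | f+1, (u, c :: cs, acc) :: st, res =>
    match PySem.Dict.get? res c with
    | some emp => loopB map f ((u, cs, if emp = [] then acc else PySem.Set.update acc emp) :: st) res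
    | none =>
      match PySem.Dict.get? map c with
      | none => none                                            -- KeyError
      | some ckids => loopB map f ((c, ckids, ckids) :: (u, cs, acc) :: st) res
  | f+1, (u, [], acc) :: st, res =>
    match st with
    | [] => loopB map f [] (PySem.Dict.insert res u acc)
    | (p, pcs, pacc) :: st' =>
      loopB map f ((p, pcs, if acc = [] then pacc else PySem.Set.update pacc acc) :: st') (PySem.Dict.insert res u acc)
termination_by f => f

def findAllReportingEmployees_alt (manager : Int) (managerToEmployeeMappings : List (Int × List Int)) (result : List (Int × List Int)) : List Int :=
  let mmap := PySem.Dict.mk managerToEmployeeMappings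
  let mres := PySem.Dict.mk result
  match PySem.Dict.get? mres manager with
  | some v => v
  | none =>
    match PySem.Dict.get? mmap manager with
    | none => []
    | some kids =>
      match loopB mmap ((managerToEmployeeMappings.map (fun kv => kv.2.length + 2)).sum + 2) [(manager, kids, kids)] mres with
      | none => []
      | some res' => (PySem.Dict.get? res' manager).getD []

-- ===== PRECONDITION & SPEC =====
-- okD n u = "every chain of reportees unfolding from u (stopping at keys already in result)
-- stays inside the mapping's keys and dies out within depth n": with n = mappings.length + 2
-- this says exactly that every transitively reached manager is covered by `result` or the
-- mapping and that the reached part of the reporting graph is acyclic — precisely the inputs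
-- on which the Python A returns instead of raising AttributeError / RecursionError.
def okD (map : PySem.Dict Int (List Int)) (res0 : PySem.Dict Int (List Int)) : Nat → Int → Bool
  | 0, _ => false
  | n+1, u =>
    PySem.Dict.contains res0 u ||
      (match PySem.Dict.get? map u with
       | none => false
       | some ch => ch.all (fun c => okD map res0 n c))

def Pre_findAllReportingEmployees (manager : Int) (managerToEmployeeMappings : List (Int × List Int)) (result : List (Int × List Int)) : Prop :=
  okD (PySem.Dict.mk managerToEmployeeMappings) (PySem.Dict.mk result) (managerToEmployeeMappings.length + 2) manager = true
instance (manager : Int) (managerToEmployeeMappings : List (Int × List Int)) (result : List (Int × List Int)) : Decidable (Pre_findAllReportingEmployees manager managerToEmployeeMappings result) := by unfold Pre_findAllReportingEmployees; infer_instance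

def pvWitness_findAllReportingEmployees : Int × (List (Int × List Int)) × (List (Int × List Int)) :=
  (1, [(1, [2, 3]), (2, [3]), (3, [])], [(4, [5])])

def Spec_findAllReportingEmployees (manager : Int) (managerToEmployeeMappings : List (Int × List Int)) (result : List (Int × List Int)) (out : List Int) : Prop := out = findAllReportingEmployees_alt manager managerToEmployeeMappings result
instance (manager : Int) (managerToEmployeeMappings : List (Int × List Int)) (result : List (Int × List Int)) (out : List Int) : Decidable (Spec_findAllReportingEmployees manager managerToEmployeeMappings result out) := by unfold Spec_findAllReportingEmployees; infer_instance

-- ===== CLAIM (what is proved, stated in full; the proofs are below) =====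
def Claim_equal_findAllReportingEmployees : Prop := ∀ (manager : Int) (managerToEmployeeMappings : List (Int × List Int)) (result : List (Int × List Int)), Dom_findAllReportingEmployees manager managerToEmployeeMappings result → Pre_findAllReportingEmployees manager managerToEmployeeMappings result → Spec_findAllReportingEmployees manager managerToEmployeeMappings result (findAllReportingEmployees manager managerToEmployeeMappings result)

-- ===== LEMMAS AND PROOFS =====

theorem pvWitness_ok :
    Dom_findAllReportingEmployees pvWitness_findAllReportingEmployees.1 pvWitness_findAllReportingEmployees.2.1 pvWitness_findAllReportingEmployees.2.2 ∧
    Pre_findAllReportingEmployees pvWitness_findAllReportingEmployees.1 pvWitness_findAllReportingEmployees.2.1 pvWitness_findAllReportingEmployees.2.2 := by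
  decide


-- Paths through the reporting graph (stopping at keys already present in the original result).
def RPath (ms : List (Int × List Int)) (r0 : PySem.Dict Int (List Int)) : Int → Nat → Int → Prop
  | x, 0, y => x = y
  | x, L+1, y => PySem.Dict.contains r0 x = false ∧
      ∃ ch, PySem.Dict.get? (PySem.Dict.mk ms) x = some ch ∧ ∃ c ∈ ch, RPath ms r0 c L y

theorem path_trans {ms : List (Int × List Int)} {r0 : PySem.Dict Int (List Int)} :
    ∀ {L M : Nat} {x y z : Int}, RPath ms r0 x L y → RPath ms r0 y M z → RPath ms r0 x (L + M) z := by
  intro L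
  induction L with
  | zero => intro M x y z h1 h2; cases h1; simpa using h2
  | succ L ih =>
    intro M x y z h1 h2
    obtain ⟨hx, ch, hch, c, hc, hp⟩ := h1
    have harith : L + 1 + M = (L + M) + 1 := by omega
    rw [harith]
    show PySem.Dict.contains r0 x = false ∧ _
    exact ⟨hx, ch, hch, c, hc, ih hp h2⟩

theorem path_bound {ms : List (Int × List Int)} {r0 : PySem.Dict Int (List Int)} :
    ∀ {L : Nat} {n : Nat} {x y : Int}, okD (PySem.Dict.mk ms) r0 n x = true → RPath ms r0 x L y → L ≤ n := by
  intro L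
  induction L with
  | zero => intro n x y _ _; exact Nat.zero_le n
  | succ L ih =>
    intro n x y hok hp
    obtain ⟨hx, ch, hch, c, hc, hp'⟩ := hp
    cases n with
    | zero => simp [okD] at hok
    | succ n =>
      simp only [okD, hx, hch, Bool.false_or, List.all_eq_true] at hok
      exact Nat.succ_le_succ (ih (hok c hc) hp')

theorem path_pump {ms : List (Int × List Int)} {r0 : PySem.Dict Int (List Int)} {u : Int} {L : Nat}
    (hp : RPath ms r0 u L u) : ∀ k : Nat, RPath ms r0 u (k * L) u := by
  intro k
  induction k with
  | zero => simp [RPath]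
  | succ k ih => exact (by simpa [Nat.succ_mul] using path_trans ih hp)

theorem no_self_path {ms : List (Int × List Int)} {r0 : PySem.Dict Int (List Int)} {n : Nat} {u : Int} {L : Nat}
    (hok : okD (PySem.Dict.mk ms) r0 n u = true) (hp : RPath ms r0 u L u) : L = 0 := by
  by_contra hL
  have hL1 : 1 ≤ L := Nat.one_le_iff_ne_zero.mpr hL
  have hbig := path_bound hok (path_pump hp (n + 1))
  have : n + 1 ≤ (n + 1) * L := Nat.le_mul_of_pos_right _ (by omega)
  omega

-- Instrumented mirror of goA: the extra Nat is the number of loopB iterations the corresponding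
-- subtree costs in port B (proof-only; goA_eq_goAC below projects it away).
mutual
def goAC (ms : List (Int × List Int)) : Nat → Int → PySem.Dict Int (List Int) → Option (List Int × PySem.Dict Int (List Int) × Nat)
  | 0, _, _ => none
  | f+1, u, res =>
    match PySem.Dict.get? res u with
    | some v => some (v, res, 0)
    | none =>
      match PySem.Dict.get? (PySem.Dict.mk ms) u with
      | none => none
      | some me =>
        match goACList ms f me me res with
        | none => none
        | some (acc, res', t) => some (acc, PySem.Dict.insert res' u acc, t + 1)
termination_by f => (f, 0)

def goACList (ms : List (Int × List Int)) : Nat → List Int → List Int → PySem.Dict Int (List Int) → Option (List Int × PySem.Dict Int (List Int) × Nat)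
  | _, [], acc, res => some (acc, res, 0)
  | f, c :: cs, acc, res =>
    match goAC ms f c res with
    | none => none
    | some (emp, res', tc) =>
      match goACList ms f cs (if emp = [] then acc else PySem.Set.update acc emp) res' with
      | none => none
      | some (a, r, t) => some (a, r, tc + 1 + t)
termination_by f cs => (f, cs.length + 1)
end

theorem goA_eq_goAC (ms : List (Int × List Int)) :
    ∀ f : Nat,
      (∀ u res, goA (PySem.Dict.mk ms) f u res = (goAC ms f u res).map (fun x => (x.1, x.2.1))) ∧
      (∀ cs acc res, goAList (PySem.Dict.mk ms) f cs acc res = (goACList ms f cs acc res).map (fun x => (x.1, x.2.1))) := by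
  intro f
  induction f with
  | zero =>
    constructor
    · intro u res; simp [goA, goAC]
    · intro cs acc res
      cases cs with
      | nil => simp [goAList, goACList]
      | cons c cs => simp [goAList, goACList, goA, goAC]
  | succ f ih =>
    have hA : ∀ u res, goA (PySem.Dict.mk ms) (f+1) u res = (goAC ms (f+1) u res).map (fun x => (x.1, x.2.1)) := by
      intro u res
      simp only [goA, goAC]
      cases hres : PySem.Dict.get? res u with
      | some v => simp
      | none =>
        simp only
        cases hmap : PySem.Dict.get? (PySem.Dict.mk ms) u with
        | none => simp
        | some me =>
          simp only [ih.2 me me res]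
          cases goACList ms f me me res with
          | none => simp
          | some x => rcases x with ⟨a, r, t⟩; simp
    refine ⟨hA, ?_⟩
    intro cs
    induction cs with
    | nil => intro acc res; simp [goAList, goACList]
    | cons c cs ihcs =>
      intro acc res
      simp only [goAList, goACList, hA c res]
      cases goAC ms (f+1) c res with
      | none => simp
      | some x =>
        rcases x with ⟨emp, res', tc⟩
        simp only [Option.map_some]
        rw [ihcs]
        cases goACList ms (f+1) cs (if emp = [] then acc else PySem.Set.update acc emp) res' with
        | none => simp
        | some y => rcases y with ⟨a, r, t⟩; simp

-- Remaining fuel budget for port B: the weights of the mapping entries not yet cached in res.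
def phi (ms : List (Int × List Int)) (res : PySem.Dict Int (List Int)) : Nat :=
  match ms with
  | [] => 0
  | kv :: tl => (if PySem.Dict.contains res kv.1 then 0 else kv.2.length + 2) + phi tl res

theorem phi_mono {ms : List (Int × List Int)} {res res' : PySem.Dict Int (List Int)}
    (h : ∀ k, PySem.Dict.contains res k = true → PySem.Dict.contains res' k = true) :
    phi ms res' ≤ phi ms res := by
  induction ms with
  | nil => simp [phi]
  | cons kv tl ih =>
    cases hc : PySem.Dict.contains res kv.1 with
    | true => simp [phi, hc, h kv.1 hc]; omega
    | false =>
      cases hc' : PySem.Dict.contains res' kv.1 with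
      | true => simp [phi, hc, hc']; omega
      | false => simp [phi, hc, hc']; omega

theorem contains_insert_mono {res : PySem.Dict Int (List Int)} {u : Int} {w : List Int} :
    ∀ k, PySem.Dict.contains res k = true → PySem.Dict.contains (PySem.Dict.insert res u w) k = true := by
  intro k h; rw [PySem.Dict.contains_insert]; simp [h]

theorem phi_insert_drop {ms : List (Int × List Int)} {res : PySem.Dict Int (List Int)} {u : Int}
    {ch w : List Int} (hu : PySem.Dict.contains res u = false)
    (hch : PySem.Dict.get? (PySem.Dict.mk ms) u = some ch) :
    phi ms (PySem.Dict.insert res u w) + (ch.length + 2) ≤ phi ms res := by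
  induction ms with
  | nil => simp [PySem.Dict.get?] at hch
  | cons kv tl ih =>
    rcases kv with ⟨k, v⟩
    rw [PySem.Dict.get?_mk_cons] at hch
    have hmono := phi_mono (ms := tl) (contains_insert_mono (res := res) (u := u) (w := w))
    by_cases hk : k = u
    · subst hk
      simp only [beq_self_eq_true, if_true, Option.some.injEq] at hch
      subst hch
      have h1 : PySem.Dict.contains (PySem.Dict.insert res k w) k = true := by
        rw [PySem.Dict.contains_insert]; simp
      simp [phi, h1, hu]
      omega
    · have hkne : (k == u) = false := by simp [hk]
      simp [hkne] at hch
      have hceq : PySem.Dict.contains (PySem.Dict.insert res u w) k = PySem.Dict.contains res k := by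
        rw [PySem.Dict.contains_insert]; simp [hk]
      have := ih hch
      cases hc : PySem.Dict.contains res k with
      | true => simp [phi, hceq, hc]; omega
      | false => simp [phi, hceq, hc]; omega

theorem phi_lower {ms : List (Int × List Int)} {res : PySem.Dict Int (List Int)} {u : Int}
    {ch : List Int} (hu : PySem.Dict.contains res u = false)
    (hch : PySem.Dict.get? (PySem.Dict.mk ms) u = some ch) :
    ch.length + 2 ≤ phi ms res := by
  induction ms with
  | nil => simp [PySem.Dict.get?] at hch
  | cons kv tl ih =>
    rcases kv with ⟨k, v⟩
    rw [PySem.Dict.get?_mk_cons] at hch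
    by_cases hk : k = u
    · subst hk
      simp only [beq_self_eq_true, if_true, Option.some.injEq] at hch
      subst hch
      simp [phi, hu]
    · have hkne : (k == u) = false := by simp [hk]
      simp [hkne] at hch
      have := ih hch
      cases hc : PySem.Dict.contains res k with
      | true => simp [phi, hc]; omega
      | false => simp [phi, hc]; omega

theorem phi_le_total (ms : List (Int × List Int)) (res : PySem.Dict Int (List Int)) :
    phi ms res ≤ (ms.map (fun kv => kv.2.length + 2)).sum := by
  induction ms with
  | nil => simp [phi]
  | cons kv tl ih =>
    cases hc : PySem.Dict.contains res kv.1 with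
    | true => simp only [phi, hc, reduceIte, List.map_cons, List.sum_cons]; omega
    | false => simp only [phi, hc, Bool.false_eq_true, reduceIte, List.map_cons, List.sum_cons]; omega

-- Main success lemma: under okD the instrumented A-run succeeds, result keys only grow,
-- every new key is reachable from the entry node, and the step count fits the phi budget.
theorem okMain (ms : List (Int × List Int)) (r0 : PySem.Dict Int (List Int)) :
    ∀ n : Nat,
      (∀ f u res, okD (PySem.Dict.mk ms) r0 n u = true → n ≤ f →
        (∀ k, PySem.Dict.contains r0 k = true → PySem.Dict.contains res k = true) →
        ∃ v res' t, goAC ms f u res = some (v, res', t) ∧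
          (∀ k, PySem.Dict.contains res k = true → PySem.Dict.contains res' k = true) ∧
          (∀ k, PySem.Dict.contains res' k = true →
            PySem.Dict.contains res k = true ∨ ∃ L, RPath ms r0 u L k) ∧
          phi ms res' + t ≤ phi ms res) ∧
      (∀ f cs acc res, (∀ c ∈ cs, okD (PySem.Dict.mk ms) r0 n c = true) → n ≤ f →
        (∀ k, PySem.Dict.contains r0 k = true → PySem.Dict.contains res k = true) →
        ∃ a r t, goACList ms f cs acc res = some (a, r, t) ∧
          (∀ k, PySem.Dict.contains res k = true → PySem.Dict.contains r k = true) ∧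
          (∀ k, PySem.Dict.contains r k = true →
            PySem.Dict.contains res k = true ∨ ∃ c ∈ cs, ∃ L, RPath ms r0 c L k) ∧
          phi ms r + t ≤ phi ms res + cs.length) := by
  intro n
  induction n with
  | zero =>
    constructor
    · intro f u res hok _ _; simp [okD] at hok
    · intro f cs acc res hall _ _
      cases cs with
      | nil =>
        exact ⟨acc, res, 0, by simp [goACList], fun k h => h, fun k h => Or.inl h, by omega⟩
      | cons c cs => have := hall c (by simp); simp [okD] at this
  | succ n ihn =>
    have hA : ∀ f u res, okD (PySem.Dict.mk ms) r0 (n+1) u = true → n + 1 ≤ f →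
        (∀ k, PySem.Dict.contains r0 k = true → PySem.Dict.contains res k = true) →
        ∃ v res' t, goAC ms f u res = some (v, res', t) ∧
          (∀ k, PySem.Dict.contains res k = true → PySem.Dict.contains res' k = true) ∧
          (∀ k, PySem.Dict.contains res' k = true →
            PySem.Dict.contains res k = true ∨ ∃ L, RPath ms r0 u L k) ∧
          phi ms res' + t ≤ phi ms res := by
      intro f u res hok hf hM0
      obtain ⟨f0, rfl⟩ : ∃ f0, f = f0 + 1 := ⟨f - 1, by omega⟩
      cases hres : PySem.Dict.contains res u with
      | true =>
        have hv : ∃ v, PySem.Dict.get? res u = some v := by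
          rw [PySem.Dict.contains_eq_isSome_get?] at hres
          exact Option.isSome_iff_exists.mp hres
        obtain ⟨v, hv⟩ := hv
        exact ⟨v, res, 0, by simp [goAC, hv], fun k h => h, fun k h => Or.inl h, by omega⟩
      | false =>
        have hr0 : PySem.Dict.contains r0 u = false := by
          cases h0 : PySem.Dict.contains r0 u with
          | false => rfl
          | true => rw [hM0 u h0] at hres; exact hres
        have hok' := hok
        simp only [okD, hr0, Bool.false_or] at hok'
        cases hmap : PySem.Dict.get? (PySem.Dict.mk ms) u with
        | none => rw [hmap] at hok'; simp at hok'
        | some ch =>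
          rw [hmap] at hok'
          simp only [List.all_eq_true] at hok'
          obtain ⟨a, r, tl, heq, hgrow, hnew, hphi⟩ :=
            ihn.2 f0 ch ch res (fun c hc => hok' c hc) (by omega) hM0
          have hresn : PySem.Dict.get? res u = none := by
            rw [PySem.Dict.get?_eq_none_iff_contains]; exact hres
          have hru : PySem.Dict.contains r u = false := by
            cases hrut : PySem.Dict.contains r u with
            | false => rfl
            | true =>
              rcases hnew u hrut with h | ⟨c, hc, L, hp⟩
              · rw [h] at hres; exact hres.symm ▸ rfl
              · have hcyc : RPath ms r0 u (L + 1) u := ⟨hr0, ch, hmap, c, hc, hp⟩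
                exact absurd (no_self_path hok hcyc) (by omega)
          refine ⟨a, PySem.Dict.insert r u a, tl + 1, by simp [goAC, hresn, hmap, heq], ?_, ?_, ?_⟩
          · intro k hk
            exact contains_insert_mono k (hgrow k hk)
          · intro k hk
            rw [PySem.Dict.contains_insert] at hk
            rcases Bool.or_eq_true_iff.mp hk with hke | hkr
            · have : k = u := by simpa using hke
              subst this
              exact Or.inr ⟨0, rfl⟩
            · rcases hnew k hkr with h | ⟨c, hc, L, hp⟩
              · exact Or.inl h
              · exact Or.inr ⟨L + 1, hr0, ch, hmap, c, hc, hp⟩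
          · have hdrop := phi_insert_drop (ms := ms) (w := a) hru hmap
            omega
    refine ⟨hA, ?_⟩
    intro f cs
    induction cs with
    | nil =>
      intro acc res _ _ _
      exact ⟨acc, res, 0, by simp [goACList], fun k h => h, fun k h => Or.inl h, by omega⟩
    | cons c cs ih2 =>
      intro acc res hall hf hM0
      obtain ⟨emp, res1, tc, heqc, hgrow1, hnew1, hphi1⟩ :=
        hA f c res (hall c (by simp)) hf hM0
      obtain ⟨a, r, t', heq', hgrow2, hnew2, hphi2⟩ :=
        ih2 (if emp = [] then acc else PySem.Set.update acc emp) res1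
          (fun c' hc' => hall c' (by simp [hc'])) hf
          (fun k hk => hgrow1 k (hM0 k hk))
      obtain ⟨f0, rfl⟩ : ∃ f0, f = f0 + 1 := ⟨f - 1, by omega⟩
      have heq'' : goACList ms (f0 + 1) cs (if emp = [] then acc else PySem.Set.update acc emp) res1 = some (a, r, t') := by
        simpa using heq'
      refine ⟨a, r, tc + 1 + t', by simp [goACList, heqc, heq''], ?_, ?_, by simp; omega⟩
      · intro k hk; exact hgrow2 k (hgrow1 k hk)
      · intro k hk
        rcases hnew2 k hk with h1 | ⟨c', hc', L, hp⟩
        · rcases hnew1 k h1 with h2 | ⟨L, hp⟩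
          · exact Or.inl h2
          · exact Or.inr ⟨c, by simp, L, hp⟩
        · exact Or.inr ⟨c', by simp [hc'], L, hp⟩

-- Step-exact simulation: an instrumented A-run of cost t corresponds to exactly t+1 loop
-- iterations of port B's stack machine (the last one pops the finished frame into its parent).
def popCont (ms : List (Int × List Int)) (F : Nat) (u : Int) (a : List Int)
    (r : PySem.Dict Int (List Int)) : List (Int × List Int × List Int) → Option (PySem.Dict Int (List Int))
  | [] => loopB (PySem.Dict.mk ms) F [] (PySem.Dict.insert r u a)
  | (p, pcs, pacc) :: st' =>
      loopB (PySem.Dict.mk ms) F ((p, pcs, if a = [] then pacc else PySem.Set.update pacc a) :: st')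
        (PySem.Dict.insert r u a)

theorem slMain (ms : List (Int × List Int)) :
    ∀ f : Nat,
      (∀ (u : Int) res emp res' t, goAC ms f u res = some (emp, res', t) →
        ∀ (F : Nat) (v : Int) (cs acc : List Int) st,
          loopB (PySem.Dict.mk ms) (t + 1 + F) ((v, u :: cs, acc) :: st) res =
            loopB (PySem.Dict.mk ms) F ((v, cs, if emp = [] then acc else PySem.Set.update acc emp) :: st) res') ∧
      (∀ (cs acc : List Int) res a r t, goACList ms f cs acc res = some (a, r, t) →
        ∀ (F : Nat) (u : Int) st,
          loopB (PySem.Dict.mk ms) (t + 1 + F) ((u, cs, acc) :: st) res = popCont ms F u a r st) := by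
  intro f
  induction f with
  | zero =>
    constructor
    · intro u res emp res' t h; simp [goAC] at h
    · intro cs acc res a r t h F u st
      cases cs with
      | nil =>
        simp only [goACList, Option.some.injEq] at h
        obtain ⟨rfl, rfl, rfl⟩ : acc = a ∧ res = r ∧ (0 : Nat) = t := by
          exact ⟨congrArg (fun x => x.1) h, congrArg (fun x => x.2.1) h, congrArg (fun x => x.2.2) h⟩
        have hfu : (0 : Nat) + 1 + F = F + 1 := by omega
        rw [hfu]
        cases st with
        | nil => simp [loopB, popCont]
        | cons fr st' => rcases fr with ⟨p, pcs, pacc⟩; simp [loopB, popCont]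
      | cons c cs' => simp [goACList, goAC] at h
  | succ f ih =>
    have hA : ∀ (u : Int) res emp res' t, goAC ms (f+1) u res = some (emp, res', t) →
        ∀ (F : Nat) (v : Int) (cs acc : List Int) st,
          loopB (PySem.Dict.mk ms) (t + 1 + F) ((v, u :: cs, acc) :: st) res =
            loopB (PySem.Dict.mk ms) F ((v, cs, if emp = [] then acc else PySem.Set.update acc emp) :: st) res' := by
      intro u res emp res' t h F v cs acc st
      cases hres : PySem.Dict.get? res u with
      | some w =>
        simp only [goAC, hres, Option.some.injEq] at h
        obtain ⟨rfl, rfl, rfl⟩ : w = emp ∧ res = res' ∧ (0 : Nat) = t :=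
          ⟨congrArg (fun x => x.1) h, congrArg (fun x => x.2.1) h, congrArg (fun x => x.2.2) h⟩
        have hfu : (0 : Nat) + 1 + F = F + 1 := by omega
        rw [hfu]
        simp [loopB, hres]
      | none =>
        cases hmap : PySem.Dict.get? (PySem.Dict.mk ms) u with
        | none => simp [goAC, hres, hmap] at h
        | some me =>
          cases hlist : goACList ms f me me res with
          | none => simp [goAC, hres, hmap, hlist] at h
          | some x =>
            rcases x with ⟨a1, r1, t1⟩
            simp only [goAC, hres, hmap, hlist, Option.some.injEq] at h
            obtain ⟨rfl, rfl, rfl⟩ : a1 = emp ∧ PySem.Dict.insert r1 u a1 = res' ∧ t1 + 1 = t :=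
              ⟨congrArg (fun x => x.1) h, congrArg (fun x => x.2.1) h, congrArg (fun x => x.2.2) h⟩
            have hfu : t1 + 1 + 1 + F = (t1 + 1 + F) + 1 := by omega
            rw [hfu]
            have hstep : loopB (PySem.Dict.mk ms) ((t1 + 1 + F) + 1) ((v, u :: cs, acc) :: st) res =
                loopB (PySem.Dict.mk ms) (t1 + 1 + F) ((u, me, me) :: (v, cs, acc) :: st) res := by
              simp [loopB, hres, hmap]
            rw [hstep, ih.2 me me res a1 r1 t1 hlist F u ((v, cs, acc) :: st)]
            simp [popCont]
    refine ⟨hA, ?_⟩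
    intro cs
    induction cs with
    | nil =>
      intro acc res a r t h F u st
      simp only [goACList, Option.some.injEq] at h
      obtain ⟨rfl, rfl, rfl⟩ : acc = a ∧ res = r ∧ (0 : Nat) = t :=
        ⟨congrArg (fun x => x.1) h, congrArg (fun x => x.2.1) h, congrArg (fun x => x.2.2) h⟩
      have hfu : (0 : Nat) + 1 + F = F + 1 := by omega
      rw [hfu]
      cases st with
      | nil => simp [loopB, popCont]
      | cons fr st' => rcases fr with ⟨p, pcs, pacc⟩; simp [loopB, popCont]
    | cons c cs' ihcs =>
      intro acc res a r t h F u st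
      cases hc : goAC ms (f+1) c res with
      | none => simp [goACList, hc] at h
      | some x =>
        rcases x with ⟨emp, res1, tc⟩
        cases hl : goACList ms (f+1) cs' (if emp = [] then acc else PySem.Set.update acc emp) res1 with
        | none => simp [goACList, hc, hl] at h
        | some y =>
          rcases y with ⟨a2, r2, t2⟩
          simp only [goACList, hc, hl, Option.some.injEq] at h
          obtain ⟨rfl, rfl, rfl⟩ : a2 = a ∧ r2 = r ∧ tc + 1 + t2 = t :=
            ⟨congrArg (fun x => x.1) h, congrArg (fun x => x.2.1) h, congrArg (fun x => x.2.2) h⟩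
          have hfu : tc + 1 + t2 + 1 + F = tc + 1 + (t2 + 1 + F) := by omega
          rw [hfu, hA c res emp res1 tc hc (t2 + 1 + F) u cs' acc st,
            ihcs (if emp = [] then acc else PySem.Set.update acc emp) res1 a2 r2 t2 hl F u st]

theorem loopB_done (ms : List (Int × List Int)) (F : Nat) (res : PySem.Dict Int (List Int)) :
    loopB (PySem.Dict.mk ms) F [] res = some res := by
  cases F <;> simp [loopB]

-- ===== VERDICT (by name: the statement is the Claim_ definition above) =====
theorem findAllReportingEmployees_spec : Claim_equal_findAllReportingEmployees := by
  intro m ms rs _ hpre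
  unfold Pre_findAllReportingEmployees at hpre
  unfold Spec_findAllReportingEmployees findAllReportingEmployees findAllReportingEmployees_alt
  cases hres : PySem.Dict.get? (PySem.Dict.mk rs) m with
  | some v =>
    rw [show ms.length + 2 = (ms.length + 1) + 1 from rfl]
    simp [goA, hres]
  | none =>
    have hc0 : PySem.Dict.contains (PySem.Dict.mk rs) m = false :=
      (PySem.Dict.get?_eq_none_iff_contains _ _).mp hres
    rw [show ms.length + 2 = (ms.length + 1) + 1 from rfl] at hpre ⊢
    have hok := hpre
    simp only [okD, hc0, Bool.false_or] at hok
    cases hmap : PySem.Dict.get? (PySem.Dict.mk ms) m with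
    | none => rw [hmap] at hok; simp at hok
    | some ch =>
      rw [hmap] at hok
      simp only [List.all_eq_true] at hok
      obtain ⟨a, r, tl, heq, hgrow, hnew, hphi⟩ :=
        (okMain ms (PySem.Dict.mk rs) (ms.length + 1)).2 (ms.length + 1) ch ch (PySem.Dict.mk rs)
          (fun c hc => hok c hc) (Nat.le_refl _) (fun k h => h)
      -- A's value
      have hAlist : goAList (PySem.Dict.mk ms) (ms.length + 1) ch ch (PySem.Dict.mk rs) = some (a, r) := by
        rw [(goA_eq_goAC ms (ms.length + 1)).2 ch ch (PySem.Dict.mk rs), heq]; rfl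
      have hAeq : goA (PySem.Dict.mk ms) ((ms.length + 1) + 1) m (PySem.Dict.mk rs) =
          some (a, PySem.Dict.insert r m a) := by
        simp [goA, hres, hmap, hAlist]
      -- the top node is never re-entered, so its budget is still unspent in r
      have hrm : PySem.Dict.contains r m = false := by
        cases hrt : PySem.Dict.contains r m with
        | false => rfl
        | true =>
          rcases hnew m hrt with h | ⟨c, hc, L, hp⟩
          · rw [h] at hc0; exact absurd hc0 (by simp)
          · have hcyc : RPath ms (PySem.Dict.mk rs) m (L + 1) m := ⟨hc0, ch, hmap, c, hc, hp⟩
            exact absurd (no_self_path hpre hcyc) (by omega)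
      have hlow := phi_lower (res := r) hrm hmap
      have htot := phi_le_total ms (PySem.Dict.mk rs)
      -- fuel of port B suffices
      obtain ⟨F, hF⟩ : ∃ F, (ms.map (fun kv => kv.2.length + 2)).sum + 2 = tl + 1 + F :=
        ⟨(ms.map (fun kv => kv.2.length + 2)).sum + 2 - (tl + 1), by omega⟩
      have hB := (slMain ms (ms.length + 1)).2 ch ch (PySem.Dict.mk rs) a r tl heq F m []
      simp only [popCont] at hB
      rw [loopB_done] at hB
      simp only [hres, hmap, hAeq]
      rw [hF, hB]
      simp [PySem.Dict.get?_insert_self]
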